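-- pv_equiv track=rewrite | github.com/megdcosta/baby-names-comparative-study | functions/returnName.py | returnName
-- ===== SOURCE A (Python) =====
-- def returnName(name):
--
--     name = name.title()
--
--     #Keep this for loop if we want anythin after ' to be lowercase, otherwise we can delete
--     for i in range(len(name)):
--         if name[i] == '\'' and i != len(name) - 1:
--             tempName = list(name)
--             tempName[i+1] = tempName[i+1].lower()
--             name = "".join(tempName)
--
--     # Note: this function prints the name without a newline at the end
--     return name
-- ===== SOURCE B (Python) =====
-- def returnName(name):
--     # One left-to-right pass over the title-cased string, lowercasing any
--     # character that directly follows an apostrophe (no per-apostrophe rebuild).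
--     out = []
--     prev = None
--     for c in name.title():
--         out.append(c.lower() if prev == "'" else c)
--         prev = c
--     return "".join(out)
-- ===== Notes on version B (the rewrite author's own statement) =====
-- stated objective: simpler
-- what changed: Replaces the index scan that rebuilds the whole string (list(name) + join) at every apostrophe with a single left-to-right pass that tracks the previous character and lowercases a character directly following an apostrophe.
import Mathlib
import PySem

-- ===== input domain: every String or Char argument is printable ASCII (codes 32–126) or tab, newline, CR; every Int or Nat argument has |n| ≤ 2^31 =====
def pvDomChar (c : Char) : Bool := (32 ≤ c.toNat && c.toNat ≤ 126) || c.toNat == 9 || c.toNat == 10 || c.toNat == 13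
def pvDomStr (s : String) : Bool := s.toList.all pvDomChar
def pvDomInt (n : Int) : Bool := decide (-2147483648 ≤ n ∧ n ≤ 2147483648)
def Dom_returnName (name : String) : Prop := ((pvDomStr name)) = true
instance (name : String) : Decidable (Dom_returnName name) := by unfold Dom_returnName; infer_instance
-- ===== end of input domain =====

-- B replaces A's index scan with per-apostrophe whole-string rebuilds by one
-- left-to-right pass tracking the previous character (objective: simpler).

-- shared helper: Python's str.title(), exact on the ASCII domain (a char is
-- "cased" iff it is an ASCII letter; an alpha char after a non-cased char is
-- uppercased, an alpha char after a cased char is lowercased)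
def pyTitleAux : List Char → Bool → List Char
  | [], _ => []
  | c :: rest, prevCased =>
    (if PySem.Chars.isalpha c then
        (if prevCased then PySem.Chars.lowerChar c else PySem.Chars.upperChar c)
      else c) :: pyTitleAux rest (PySem.Chars.isalpha c)

def pyTitle (cs : List Char) : List Char := pyTitleAux cs false

-- ===== PORT A =====
-- one iteration of A's loop body: if name[i] == "'" and i != len(name)-1,
-- rebuild the string with position i+1 lowercased (indexing at i and i+1 is
-- in range whenever the condition holds, so getD is exact)
def returnNameStep (s : List Char) (i : Nat) : List Char :=
  if s.getD i ' ' = '\'' ∧ i ≠ s.length - 1 then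
    s.set (i + 1) (PySem.Chars.lowerChar (s.getD (i + 1) ' '))
  else s

def returnName (name : String) : String :=
  let t := pyTitle name.toList
  String.ofList ((List.range t.length).foldl returnNameStep t)

-- ===== PORT B =====
-- one pass: state is (output chars so far, previous char; None before the first)
def returnName_alt (name : String) : String :=
  let t := pyTitle name.toList
  String.ofList (t.foldl
    (fun (st : List Char × Option Char) c =>
      (st.1 ++ [if st.2 = some '\'' then PySem.Chars.lowerChar c else c], some c))
    (([] : List Char), (none : Option Char))).1

-- ===== PRECONDITION & SPEC =====
def Spec_returnName (name : String) (out : String) : Prop := out = returnName_alt name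
instance (name : String) (out : String) : Decidable (Spec_returnName name out) := by unfold Spec_returnName; infer_instance

-- ===== CLAIM (what is proved, stated in full; the proofs are below) =====
def Claim_equal_returnName : Prop := ∀ (name : String), Dom_returnName name → Spec_returnName name (returnName name)

-- ===== LEMMAS AND PROOFS =====

-- the common value both loops compute: lowercase each char directly after "'"
def adjRest (p : Option Char) : List Char → List Char
  | [] => []
  | c :: rest =>
    (if p = some '\'' then PySem.Chars.lowerChar c else c) :: adjRest (some c) rest

theorem length_adjRest (p : Option Char) (cs : List Char) :
    (adjRest p cs).length = cs.length := by
  induction cs generalizing p with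
  | nil => rfl
  | cons c rest ih => simp [adjRest, ih]

theorem getElem_adjRest (p : Option Char) (cs : List Char) (j : Nat) (h : j < cs.length) :
    (adjRest p cs)[j]'(by rw [length_adjRest]; exact h) =
      if (if j = 0 then p else some (cs[j-1]'(by omega))) = some '\'' then
        PySem.Chars.lowerChar (cs[j]'h) else cs[j]'h := by
  induction cs generalizing p j with
  | nil => simp at h
  | cons c rest ih =>
    cases j with
    | zero => simp [adjRest]
    | succ k =>
      simp only [adjRest, List.getElem_cons_succ]
      rw [ih (some c) k (by simpa using h)]
      cases k <;> simp

-- B's fold appends adjRest to the accumulator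
theorem foldB_eq_adjRest (cs : List Char) (acc : List Char) (p : Option Char) :
    (cs.foldl
      (fun (st : List Char × Option Char) c =>
        (st.1 ++ [if st.2 = some '\'' then PySem.Chars.lowerChar c else c], some c))
      (acc, p)).1 = acc ++ adjRest p cs := by
  induction cs generalizing acc p with
  | nil => simp [adjRest]
  | cons c rest ih => simp [adjRest, ih, List.append_assoc]

-- lowercasing never produces an apostrophe from another character
theorem lowerChar_eq_apos_iff (c : Char) : PySem.Chars.lowerChar c = '\'' ↔ c = '\'' := by
  constructor
  · intro he
    by_cases hu : PySem.Chars.isupper c = true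
    · exfalso
      unfold PySem.Chars.isupper at hu
      rw [Bool.and_eq_true, decide_eq_true_iff, decide_eq_true_iff] at hu
      have h' : 65 ≤ c.toNat ∧ c.toNat ≤ 90 := by
        obtain ⟨h1, h2⟩ := hu
        rw [Char.le_def, UInt32.le_iff_toNat_le] at h1 h2
        exact ⟨h1, h2⟩
      unfold PySem.Chars.lowerChar at he
      rw [if_pos (by unfold PySem.Chars.isupper
                     rw [Bool.and_eq_true, decide_eq_true_iff, decide_eq_true_iff]
                     exact hu)] at he
      have h2 := congrArg Char.toNat he
      rw [Char.toNat_ofNat, if_pos (Or.inl (by omega))] at h2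
      have h3 : ('\'').toNat = 39 := rfl
      omega
    · unfold PySem.Chars.lowerChar at he
      rwa [if_neg hu] at he
  · intro he
    subst he
    rfl

-- the state of A's loop after the first k iterations: positions 1..k that
-- directly follow an apostrophe have been lowercased
def fixTo (k : Nat) (cs : List Char) : List Char :=
  cs.mapIdx (fun j c =>
    if 1 ≤ j ∧ j ≤ k ∧ cs.getD (j-1) ' ' = '\'' then PySem.Chars.lowerChar c else c)

theorem length_fixTo (k : Nat) (cs : List Char) : (fixTo k cs).length = cs.length := by
  simp [fixTo]

theorem fixTo_zero (cs : List Char) : fixTo 0 cs = cs := by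
  apply List.ext_getElem (by simp [length_fixTo])
  intro j h1 h2
  simp [fixTo]
  omega

theorem step_fixTo (cs : List Char) (k : Nat) :
    returnNameStep (fixTo k cs) k = fixTo (k+1) cs := by
  by_cases hk : k < cs.length
  · have hget : (fixTo k cs).getD k ' ' =
        (if 1 ≤ k ∧ k ≤ k ∧ cs.getD (k-1) ' ' = '\'' then
          PySem.Chars.lowerChar (cs[k]'hk) else cs[k]'hk) := by
      rw [List.getD_eq_getElem _ _ (by rw [length_fixTo]; exact hk)]
      simp [fixTo]
    have hcond : ((fixTo k cs).getD k ' ' = '\'') ↔ (cs.getD k ' ' = '\'') := by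
      rw [hget, List.getD_eq_getElem _ _ hk]
      split
      · rw [lowerChar_eq_apos_iff]
      · rfl
    unfold returnNameStep
    rw [length_fixTo]
    by_cases hc : cs.getD k ' ' = '\'' ∧ k ≠ cs.length - 1
    · rw [if_pos ⟨hcond.mpr hc.1, hc.2⟩]
      have hk1 : k + 1 < cs.length := by omega
      have hat : (fixTo k cs).getD (k+1) ' ' = cs[k+1]'hk1 := by
        rw [List.getD_eq_getElem _ _ (by rw [length_fixTo]; exact hk1)]
        simp only [fixTo, List.getElem_mapIdx]
        rw [if_neg (by omega)]
      rw [hat]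
      apply List.ext_getElem (by simp [length_fixTo])
      intro j h1 h2
      simp only [List.length_set, length_fixTo] at h1 h2
      rw [List.getElem_set]
      by_cases hj : k + 1 = j
      · subst hj
        rw [if_pos rfl]
        simp only [fixTo, List.getElem_mapIdx]
        rw [if_pos ⟨by omega, by omega, by simpa using hc.1⟩]
      · rw [if_neg hj]
        simp only [fixTo, List.getElem_mapIdx] at *
        by_cases hj1 : 1 ≤ j ∧ j ≤ k ∧ cs.getD (j-1) ' ' = '\''
        · rw [if_pos hj1, if_pos ⟨hj1.1, by omega, hj1.2.2⟩]
        · rw [if_neg hj1, if_neg (by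
            intro ⟨a, b, c⟩
            exact hj1 ⟨a, by omega, c⟩)]
    · rw [if_neg (by
        intro ⟨a, b⟩
        exact hc ⟨hcond.mp a, b⟩)]
      apply List.ext_getElem (by simp [length_fixTo])
      intro j h1 h2
      simp only [length_fixTo] at h1 h2
      simp only [fixTo, List.getElem_mapIdx] at *
      by_cases hj1 : 1 ≤ j ∧ j ≤ k ∧ cs.getD (j-1) ' ' = '\''
      · rw [if_pos hj1, if_pos ⟨hj1.1, by omega, hj1.2.2⟩]
      · rw [if_neg hj1, if_neg (by
          intro ⟨a, b, c⟩
          apply hj1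
          refine ⟨a, ?_, c⟩
          rcases Nat.lt_or_ge j (k+1) with h | h
          · omega
          · -- j = k + 1 : then cs.getD k = '\'' and k ≠ length - 1 would hold
            exfalso
            have hjk : j = k + 1 := by omega
            subst hjk
            simp only [Nat.add_sub_cancel] at c
            exact hc ⟨c, by omega⟩)]
  · -- k out of range: the step is a no-op and fixTo (k+1) = fixTo k
    have hd : (fixTo k cs).getD k ' ' = ' ' :=
      List.getD_eq_default _ _ (by rw [length_fixTo]; omega)
    unfold returnNameStep
    rw [if_neg (by intro ⟨a, _⟩; rw [hd] at a; exact absurd a (by decide))]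
    apply List.ext_getElem (by simp [length_fixTo])
    intro j h1 h2
    simp only [length_fixTo] at h1 h2
    simp only [fixTo, List.getElem_mapIdx] at *
    by_cases hj1 : 1 ≤ j ∧ j ≤ k ∧ cs.getD (j-1) ' ' = '\''
    · rw [if_pos hj1, if_pos ⟨hj1.1, by omega, hj1.2.2⟩]
    · rw [if_neg hj1, if_neg (by intro ⟨a, b, c⟩; exact hj1 ⟨a, by omega, c⟩)]

theorem foldA_eq_fixTo (m : Nat) (cs : List Char) :
    (List.range m).foldl returnNameStep cs = fixTo m cs := by
  induction m with
  | zero => simp [fixTo_zero]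
  | succ k ih => rw [List.range_succ, List.foldl_append, ih, List.foldl_cons,
                     List.foldl_nil, step_fixTo]

theorem fixTo_length_eq_adjRest (cs : List Char) :
    fixTo cs.length cs = adjRest none cs := by
  apply List.ext_getElem (by simp [length_fixTo, length_adjRest])
  intro j h1 h2
  rw [getElem_adjRest none cs j (by simpa [length_adjRest] using h2)]
  simp only [fixTo, List.getElem_mapIdx]
  cases j with
  | zero => simp
  | succ i =>
    have hi : i < cs.length := by
      rw [length_adjRest] at h2
      omega
    simp only [Nat.succ_ne_zero, if_false, Nat.add_sub_cancel,
      List.getD_eq_getElem _ _ hi, Option.some.injEq]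
    by_cases hc : cs[i]'hi = '\''
    · rw [if_pos ⟨by omega, by rw [length_adjRest] at h2; omega, hc⟩, if_pos hc]
    · rw [if_neg (by intro ⟨_, _, a⟩; exact hc a), if_neg hc]

-- ===== VERDICT (by name: the statement is the Claim_ definition above) =====
theorem returnName_spec : Claim_equal_returnName := by
  intro name _
  unfold Spec_returnName returnName returnName_alt
  simp only []
  rw [foldA_eq_fixTo, fixTo_length_eq_adjRest,
      foldB_eq_adjRest (pyTitle name.toList) [] none, List.nil_append]
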